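-- pv_equiv track=rewrite | github.com/TheTalkingWeed/RandomPythonCodes | kisFeladatok/coinShare.py | getCoinBalances
-- ===== SOURCE A (Python) =====
-- def getCoinBalances(words1,words2):
--     base_balance = [3,3]
--
--     for i in range(len(words1)):
--         if words1[i] == "share" and words2[i] == "share":
--             base_balance[0] += 2
--             base_balance[1] += 2
--
--         if words1[i] == "share" and words2[i] == "steal":
--             base_balance[0] -= 1
--             base_balance[1] += 3
--         if words1[i] == "steal" and words2[i] == "share":
--             base_balance[0] += 3
--             base_balance[1] -= 0
--
--     return base_balance
-- ===== SOURCE B (Python) =====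
-- def getCoinBalances(words1, words2):
--     # pair up the rounds, then count each relevant combination with list.count
--     rounds = list(zip(words1, words2))
--     bb = rounds.count(("share", "share"))
--     ss = rounds.count(("share", "steal"))
--     ts = rounds.count(("steal", "share"))
--     return [3 + 2 * bb - ss + 3 * ts, 3 + 2 * bb + 3 * ss]
-- ===== Notes on version B (the rewrite author's own statement) =====
-- stated objective: idiomatic
-- what changed: B builds the list of round pairs with zip and uses three list.count scans plus a closed-form formula, eliminating A's per-index branch loop that mutates both balance cells.
import Mathlib
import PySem

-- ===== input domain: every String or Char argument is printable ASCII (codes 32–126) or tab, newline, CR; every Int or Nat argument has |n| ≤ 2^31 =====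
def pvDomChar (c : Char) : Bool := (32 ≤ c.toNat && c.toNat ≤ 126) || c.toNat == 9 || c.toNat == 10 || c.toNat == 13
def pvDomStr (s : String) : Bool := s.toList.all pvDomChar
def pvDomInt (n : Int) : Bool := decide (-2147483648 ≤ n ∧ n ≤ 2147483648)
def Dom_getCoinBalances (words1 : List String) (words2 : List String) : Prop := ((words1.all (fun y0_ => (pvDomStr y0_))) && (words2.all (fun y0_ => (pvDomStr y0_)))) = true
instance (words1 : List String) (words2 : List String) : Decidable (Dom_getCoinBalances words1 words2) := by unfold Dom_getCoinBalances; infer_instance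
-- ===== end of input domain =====

-- B pairs the rounds with zip and uses three List.count scans plus a closed-form formula,
-- instead of A's per-index branch loop mutating both balance cells (objective: idiomatic).
-- Pre_ excludes exactly the inputs on which A raises IndexError.


-- ===== PORT A =====
-- literal transliteration: base_balance as a pair, three independent ifs per index of range(len(words1))
def getCoinBalancesStep (words1 words2 : List String) (b : Int × Int) (i : Int) : Int × Int :=
  let b1 := if PySem.List.pyGetD words1 i "" = "share" ∧ PySem.List.pyGetD words2 i "" = "share"
            then (b.1 + 2, b.2 + 2) else b
  let b2 := if PySem.List.pyGetD words1 i "" = "share" ∧ PySem.List.pyGetD words2 i "" = "steal"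
            then (b1.1 - 1, b1.2 + 3) else b1
  if PySem.List.pyGetD words1 i "" = "steal" ∧ PySem.List.pyGetD words2 i "" = "share"
  then (b2.1 + 3, b2.2 - 0) else b2

def getCoinBalances (words1 : List String) (words2 : List String) : List Int :=
  let bb := (PySem.List.pyRange 0 words1.length 1).foldl (getCoinBalancesStep words1 words2) (3, 3)
  [bb.1, bb.2]

-- ===== PORT B =====
-- zip the rounds, count the three relevant combinations, closed-form result
def getCoinBalances_alt (words1 : List String) (words2 : List String) : List Int :=
  let rounds := words1.zip words2
  let bb : Int := rounds.count ("share", "share")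
  let ss : Int := rounds.count ("share", "steal")
  let ts : Int := rounds.count ("steal", "share")
  [3 + 2 * bb - ss + 3 * ts, 3 + 2 * bb + 3 * ss]

-- ===== PRECONDITION & SPEC =====
-- A raises IndexError when some index i of words1 holds "share" or "steal" but words2 has no index i
-- (words2[i] is only reached after the short-circuit on words1[i]); exactly those inputs are excluded.
def Pre_getCoinBalances (words1 : List String) (words2 : List String) : Prop :=
  ∀ i : Nat, i < words1.length → (words1.getD i "" = "share" ∨ words1.getD i "" = "steal") → i < words2.length
instance (words1 : List String) (words2 : List String) : Decidable (Pre_getCoinBalances words1 words2) := by unfold Pre_getCoinBalances; infer_instance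

def pvWitness_getCoinBalances : List String × List String := (["share", "steal", "oops"], ["steal", "share"])

def Spec_getCoinBalances (words1 : List String) (words2 : List String) (out : List Int) : Prop := out = getCoinBalances_alt words1 words2
instance (words1 : List String) (words2 : List String) (out : List Int) : Decidable (Spec_getCoinBalances words1 words2 out) := by unfold Spec_getCoinBalances; infer_instance

-- ===== CLAIM (what is proved, stated in full; the proofs are below) =====
def Claim_equal_getCoinBalances : Prop := ∀ (words1 : List String) (words2 : List String), Dom_getCoinBalances words1 words2 → Pre_getCoinBalances words1 words2 → Spec_getCoinBalances words1 words2 (getCoinBalances words1 words2)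

-- ===== LEMMAS AND PROOFS =====

-- B's closed form as a function of a list of paired rounds
def pairForm (z : List (String × String)) : Int × Int :=
  (3 + 2 * (z.count ("share", "share") : Int) - (z.count ("share", "steal") : Int)
     + 3 * (z.count ("steal", "share") : Int),
   3 + 2 * (z.count ("share", "share") : Int) + 3 * (z.count ("share", "steal") : Int))

-- loop invariant: after the first n iterations A's state is the closed form of the first n paired rounds
theorem coin_fold_take (words1 words2 : List String)
    (hP : Pre_getCoinBalances words1 words2) :
    ∀ n : Nat, n ≤ words1.length →
      (PySem.List.pyRange 0 n 1).foldl (getCoinBalancesStep words1 words2) (3, 3)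
        = pairForm ((words1.zip words2).take n) := by
  intro n
  induction n with
  | zero => intro _; simp [PySem.List.pyRange_one_eq_nil, pairForm]
  | succ n ih =>
    intro hn
    have hn' : n ≤ words1.length := Nat.le_of_succ_le hn
    have hcast : ((n + 1 : Nat) : Int) = (n : Int) + 1 := by push_cast; ring
    rw [hcast, PySem.List.pyRange_one_succ_right (by positivity), List.foldl_append, ih hn']
    by_cases h2 : n < words2.length
    · -- the n-th round exists: take (n+1) appends exactly this pair
      have hz : n < (words1.zip words2).length := by simp [List.length_zip]; omega
      have htake : (words1.zip words2).take (n + 1)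
          = (words1.zip words2).take n ++ [(words1[n]'(by omega), words2[n]'h2)] := by
        rw [List.take_add_one]
        simp [List.getElem?_eq_getElem hz]
      have hg1 : PySem.List.pyGetD words1 (n : Int) "" = words1[n]'(by omega) := by
        simp [PySem.List.pyGetD_natCast, List.getD_eq_getElem?_getD,
              List.getElem?_eq_getElem (show n < words1.length by omega)]
      have hg2 : PySem.List.pyGetD words2 (n : Int) "" = words2[n]'h2 := by
        simp [PySem.List.pyGetD_natCast, List.getD_eq_getElem?_getD, List.getElem?_eq_getElem h2]
      rw [htake]
      simp only [List.foldl_cons, List.foldl_nil]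
      unfold getCoinBalancesStep pairForm
      rw [hg1, hg2]
      by_cases ha : words1[n]'(by omega) = "share" <;>
        by_cases hd : words1[n]'(by omega) = "steal" <;>
          by_cases hb : words2[n]'h2 = "share" <;>
            by_cases hc : words2[n]'h2 = "steal" <;>
              simp_all [List.count_append, List.count_nil, Prod.ext_iff] <;>
                (try constructor) <;> push_cast <;> ring
    · -- no n-th round: Pre_ says words1[n] is neither "share" nor "steal", so the step is the identity,
      -- and zip has already ended, so take (n+1) = take n
      have hw : ¬ (words1.getD n "" = "share" ∨ words1.getD n "" = "steal") := by
        intro h; exact h2 (hP n (by omega) h)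
      have hzlen : (words1.zip words2).length ≤ n := by simp [List.length_zip]; omega
      have htake : (words1.zip words2).take (n + 1) = (words1.zip words2).take n := by
        rw [List.take_of_length_le hzlen, List.take_of_length_le (by omega)]
      have hg1 : PySem.List.pyGetD words1 (n : Int) "" = words1.getD n "" := by
        simp [PySem.List.pyGetD_natCast]
      rw [htake]
      simp only [List.foldl_cons, List.foldl_nil]
      unfold getCoinBalancesStep
      rw [hg1]
      push_neg at hw
      simp only [List.getD_eq_getElem?_getD] at hw
      simp [hw.1, hw.2]

-- ===== VERDICT (by name: the statement is the Claim_ definition above) =====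
theorem getCoinBalances_spec : Claim_equal_getCoinBalances := by
  intro words1 words2 _ hP
  show getCoinBalances words1 words2 = getCoinBalances_alt words1 words2
  unfold getCoinBalances getCoinBalances_alt
  have h := coin_fold_take words1 words2 hP words1.length le_rfl
  have hfull : (words1.zip words2).take words1.length = words1.zip words2 :=
    List.take_of_length_le (by simp [List.length_zip])
  rw [hfull] at h
  simp only [h, pairForm]
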